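-- pv_equiv track=rewrite | github.com/jovisly/AdventOfCode | 2023/day_03/part1.py | has_neighboring_symbols_this_line
-- ===== SOURCE A (Python) =====
-- def has_neighboring_symbols_this_line(this_line, digits):
--     inds = [digits[1] - 1, digits[2] + 1]
--     inds = [ind for ind in inds if ind >= 0 and ind < len(this_line)]
--     chars = list(this_line)
--     is_symbol = [
--         True if not char.isdigit() and char != "." and (ind in inds) else False
--         for ind, char in enumerate(chars)
--     ]
--     return any(is_symbol)
-- ===== SOURCE B (Python) =====
-- def has_neighboring_symbols_this_line(this_line, digits):
--     n = len(this_line)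
--     return any(
--         0 <= ind < n and not this_line[ind].isdigit() and this_line[ind] != "."
--         for ind in (digits[1] - 1, digits[2] + 1)
--     )
-- ===== Notes on version B (the rewrite author's own statement) =====
-- stated objective: faster
-- what changed: Instead of building a per-character boolean list over the whole line and any()-ing it, B bounds-checks and tests the two candidate neighbor indices directly, never scanning the line.
import Mathlib
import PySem

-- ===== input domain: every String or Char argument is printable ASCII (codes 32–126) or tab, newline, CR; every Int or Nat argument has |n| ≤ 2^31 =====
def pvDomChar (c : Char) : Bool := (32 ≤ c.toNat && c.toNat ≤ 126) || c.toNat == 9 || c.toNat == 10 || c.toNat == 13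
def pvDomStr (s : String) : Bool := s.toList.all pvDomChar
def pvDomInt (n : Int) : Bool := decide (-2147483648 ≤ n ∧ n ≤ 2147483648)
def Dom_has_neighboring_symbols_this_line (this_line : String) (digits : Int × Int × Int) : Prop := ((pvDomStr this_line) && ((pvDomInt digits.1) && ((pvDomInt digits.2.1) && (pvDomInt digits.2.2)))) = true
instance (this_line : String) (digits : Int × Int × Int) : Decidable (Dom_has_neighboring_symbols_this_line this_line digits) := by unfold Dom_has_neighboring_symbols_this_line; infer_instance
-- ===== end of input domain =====

-- B checks only the two candidate neighbor indices directly instead of scanning every character of the line.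

-- ===== PORT A =====
def has_neighboring_symbols_this_line (this_line : String) (digits : Int × Int × Int) : Bool :=
  let inds0 : List Int := [digits.2.1 - 1, digits.2.2 + 1]
  let inds : List Int :=
    inds0.filter (fun ind => decide (ind ≥ 0) && decide (ind < (this_line.toList.length : Int)))
  let chars : List Char := this_line.toList
  let is_symbol : List Bool :=
    (PySem.List.enumerate chars).map (fun p =>
      if !(PySem.Chars.isdigit p.2) && p.2 ≠ '.' && decide (p.1 ∈ inds) then true else false)
  is_symbol.any id

-- ===== PORT B =====
def has_neighboring_symbols_this_line_alt (this_line : String) (digits : Int × Int × Int) : Bool :=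
  let n : Int := (this_line.toList.length : Int)
  [digits.2.1 - 1, digits.2.2 + 1].any (fun ind =>
    decide (0 ≤ ind) && decide (ind < n) &&
    (match PySem.List.pyGet? this_line.toList ind with
     | some c => !(PySem.Chars.isdigit c) && c ≠ '.'
     | none => false))

-- ===== PRECONDITION & SPEC =====
def Spec_has_neighboring_symbols_this_line (this_line : String) (digits : Int × Int × Int) (out : Bool) : Prop := out = has_neighboring_symbols_this_line_alt this_line digits
instance (this_line : String) (digits : Int × Int × Int) (out : Bool) : Decidable (Spec_has_neighboring_symbols_this_line this_line digits out) := by unfold Spec_has_neighboring_symbols_this_line; infer_instance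

-- ===== CLAIM (what is proved, stated in full; the proofs are below) =====
def Claim_equal_has_neighboring_symbols_this_line : Prop := ∀ (this_line : String) (digits : Int × Int × Int), Dom_has_neighboring_symbols_this_line this_line digits → Spec_has_neighboring_symbols_this_line this_line digits (has_neighboring_symbols_this_line this_line digits)

-- ===== LEMMAS AND PROOFS =====

-- ===== VERDICT (by name: the statement is the Claim_ definition above) =====
theorem has_neighboring_symbols_this_line_spec : Claim_equal_has_neighboring_symbols_this_line := by
  intro s d _
  unfold Spec_has_neighboring_symbols_this_line
  rw [Bool.eq_iff_iff]
  simp only [has_neighboring_symbols_this_line, has_neighboring_symbols_this_line_alt]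
  simp [List.any_eq_true, PySem.List.mem_enumerate_iff]
  constructor
  · rintro ⟨k, ⟨hk, hd, hdot⟩, hor, -⟩
    have hget : PySem.List.pyGet? s.toList (k : Int) = some s.toList[k] := by
      rw [PySem.List.pyGet?_natCast]; exact List.getElem?_eq_getElem hk
    rcases hor with h | h
    · exact Or.inl ⟨⟨by omega, by omega⟩, by rw [← h, hget]; simpa using ⟨hd, hdot⟩⟩
    · exact Or.inr ⟨⟨by omega, by omega⟩, by rw [← h, hget]; simpa using ⟨hd, hdot⟩⟩
  · rintro (⟨⟨h1, h2⟩, hm⟩ | ⟨⟨h1, h2⟩, hm⟩)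
    · rw [PySem.List.pyGet?_eq_some_getElem s.toList (i := d.2.1 - 1) (by omega) (by simp; omega)] at hm
      simp at hm
      exact ⟨d.2.1.toNat - 1, ⟨by omega, hm.1, hm.2⟩, Or.inl (by omega), by omega⟩
    · rw [PySem.List.pyGet?_eq_some_getElem s.toList (i := d.2.2 + 1) (by omega) (by simp; omega)] at hm
      simp at hm
      exact ⟨(d.2.2 + 1).toNat, ⟨by omega, hm.1, hm.2⟩, Or.inr (by omega), by omega⟩
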